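-- pv_equiv track=rewrite | github.com/desigandeva/Desigan_Sayur | Python/HW/addSpace.py | addSpace
-- ===== SOURCE A (Python) =====
-- def addSpace(string):
--     index = 0
--     count = 1
--     newString = ''
--     while index < lengthOfString(string):
--         if(count==3):
--             newString = newString + " "
--             count = 1
--         newString = newString + string[index]
--         count += 1
--         index += 1
--     return newString
--
-- def lengthOfString(string):
--     length = 0
--     for element in string:
--         length += 1
--     return length
-- ===== SOURCE B (Python) =====
-- def addSpace(string):
--     return ' '.join(string[i:i+2] for i in range(0, len(string), 2))
-- ===== Notes on version B (the rewrite author's own statement) =====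
-- stated objective: faster
-- what changed: Replaced the char-by-char counter-reset while-loop (with quadratic string concatenation and a hand-rolled length helper) with a two-phase group-then-join: slice the string into 2-char chunks via range with step 2 and join them with a single space.
import Mathlib
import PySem

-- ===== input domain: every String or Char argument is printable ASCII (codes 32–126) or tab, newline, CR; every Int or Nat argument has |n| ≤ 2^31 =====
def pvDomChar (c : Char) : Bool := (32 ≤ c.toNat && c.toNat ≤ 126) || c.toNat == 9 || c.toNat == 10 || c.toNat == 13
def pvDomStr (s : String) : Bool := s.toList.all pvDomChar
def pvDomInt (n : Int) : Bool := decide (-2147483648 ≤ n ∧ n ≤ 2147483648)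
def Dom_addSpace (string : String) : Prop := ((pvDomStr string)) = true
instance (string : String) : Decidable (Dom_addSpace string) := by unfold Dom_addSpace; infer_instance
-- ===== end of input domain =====

-- B replaces A's char-by-char counter-reset while loop (and its hand-rolled length helper) with
-- slicing the string into 2-character chunks and joining them with ' ' (idiomatic); same return value.

-- ===== PORT A =====
def lengthOfString (string : String) : Int :=
  string.toList.foldl (fun length _ => length + 1) 0

-- the port's termination argument cites this fact about the helper
theorem lengthOfString_foldl (l : List Char) (a : Int) :
    l.foldl (fun length _ => length + 1) a = a + l.length := by
  induction l generalizing a with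
  | nil => simp
  | cons x xs ih => simp [List.foldl, ih]; omega

theorem lengthOfString_eq (s : String) : lengthOfString s = (s.toList.length : Int) := by
  simpa using lengthOfString_foldl s.toList 0

-- A's while loop; `string[index]` is ported as pyGetD (the loop only reads indices with
-- 0 ≤ index < len(string), where pyGetD agrees with Python indexing; the default is never read)
def addSpaceGo (string : String) (index : Nat) (count : Int) (newString : List Char) : List Char :=
  if h : (index : Int) < lengthOfString string then
    if count == 3 then
      -- newString = newString + " "; count = 1; then newString + string[index]; count += 1
      addSpaceGo string (index + 1) (1 + 1)
        ((newString ++ [' ']) ++ [PySem.List.pyGetD string.toList (index : Int) ' '])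
    else
      addSpaceGo string (index + 1) (count + 1)
        (newString ++ [PySem.List.pyGetD string.toList (index : Int) ' '])
  else newString
termination_by string.toList.length - index
decreasing_by
  all_goals rw [lengthOfString_eq] at h; omega

def addSpace (string : String) : String :=
  String.ofList (addSpaceGo string 0 1 [])

-- ===== PORT B =====
def addSpace_alt (string : String) : String :=
  PySem.Str.join " "
    ((PySem.List.pyRange 0 (PySem.Str.len string) 2).map
      (fun i => PySem.Str.slice string (some i) (some (i + 2))))

-- ===== PRECONDITION & SPEC =====
def Spec_addSpace (string : String) (out : String) : Prop := out = addSpace_alt string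
instance (string : String) (out : String) : Decidable (Spec_addSpace string out) := by unfold Spec_addSpace; infer_instance

-- ===== CLAIM (what is proved, stated in full; the proofs are below) =====
def Claim_equal_addSpace : Prop := ∀ (string : String), Dom_addSpace string → Spec_addSpace string (addSpace string)

-- ===== LEMMAS AND PROOFS =====

-- what A's loop appends for the suffix of the string still to be processed, at a given count
def specGo : List Char → Int → List Char
  | [], _ => []
  | a :: r, c => if c == 3 then ' ' :: a :: specGo r 2 else a :: specGo r (c + 1)

theorem addSpaceGo_eq_specGo (s : String) (i : Nat) (c : Int) (acc : List Char) :
    addSpaceGo s i c acc = acc ++ specGo (s.toList.drop i) c := by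
  fun_induction addSpaceGo s i c acc with
  | case1 i c acc h hc ih =>
    rw [lengthOfString_eq] at h
    have hi : i < s.toList.length := by exact_mod_cast h
    rw [List.drop_eq_getElem_cons hi]
    simp only [beq_iff_eq] at hc
    simpa [PySem.List.pyGetD_natCast, List.getD_eq_getElem?_getD, List.getElem?_eq_getElem hi,
      specGo, hc] using ih
  | case2 i c acc h hc ih =>
    rw [lengthOfString_eq] at h
    have hi : i < s.toList.length := by exact_mod_cast h
    rw [List.drop_eq_getElem_cons hi]
    simp only [beq_iff_eq] at hc
    simpa [PySem.List.pyGetD_natCast, List.getD_eq_getElem?_getD, List.getElem?_eq_getElem hi,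
      specGo, hc] using ih
  | case3 i c acc h =>
    rw [lengthOfString_eq] at h
    have : s.toList.length ≤ i := by omega
    simp [List.drop_eq_nil_of_le this, specGo]

theorem join_cons_ne (sep p : List Char) (L : List (List Char)) (h : L ≠ []) :
    PySem.Chars.join sep (p :: L) = p ++ sep ++ PySem.Chars.join sep L := by
  match L with
  | q :: rest => exact PySem.Chars.join_cons_cons sep p q rest

-- A's loop output equals the 2-chunks of the input joined by a space
theorem spec_join (l : List Char) :
    specGo l 1 =
      PySem.Chars.join [' ']
        ((List.range ((l.length + 1) / 2)).map (fun k => (l.drop (2 * k)).take 2)) := by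
  match l with
  | [] => simp [specGo, PySem.Chars.join_nil]
  | [a] => simp [specGo, PySem.Chars.join_singleton]
  | a :: b :: r =>
    have hm : ((a :: b :: r).length + 1) / 2 = (r.length + 1) / 2 + 1 := by simp; omega
    rw [hm, List.range_succ_eq_map, List.map_cons, List.map_map]
    have hmap : ((List.range ((r.length + 1) / 2)).map
        ((fun k => ((a :: b :: r).drop (2 * k)).take 2) ∘ Nat.succ)) =
        (List.range ((r.length + 1) / 2)).map (fun k => (r.drop (2 * k)).take 2) := by
      apply List.map_congr_left
      intro k _
      simp only [Function.comp_apply, Nat.succ_eq_add_one]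
      rw [show 2 * (k + 1) = 2 * k + 1 + 1 by omega, List.drop_succ_cons, List.drop_succ_cons]
    rw [hmap]
    match r with
    | [] => simp [specGo, PySem.Chars.join_singleton]
    | x :: r' =>
      have hne : (List.range (((x :: r').length + 1) / 2)).map
          (fun k => ((x :: r').drop (2 * k)).take 2) ≠ [] := by
        simp [List.range_eq_nil]
      rw [join_cons_ne _ _ _ hne]
      have ih := spec_join (x :: r')
      simp [specGo] at ih ⊢
      simp [ih]
termination_by l.length

-- B's output, read back on the List Char side
theorem alt_toList (s : String) :
    (addSpace_alt s).toList =
      PySem.Chars.join [' ']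
        ((List.range ((s.toList.length + 1) / 2)).map
          (fun k => (s.toList.drop (2 * k)).take 2)) := by
  unfold addSpace_alt
  rw [PySem.Str.toList_join, PySem.Str.len_eq,
    PySem.List.pyRange_of_pos 0 (s.toList.length : Int) (by omega : (0:Int) < 2)]
  congr 1
  rw [List.map_map, List.map_map]
  have hcnt : (if (0:Int) < (s.toList.length : Int) then
      (((s.toList.length : Int) - 0 + 2 - 1) / 2).toNat else 0) = (s.toList.length + 1) / 2 := by
    split_ifs with h
    · omega
    · omega
  rw [hcnt]
  apply List.map_congr_left
  intro k _
  simp only [Function.comp_apply, PySem.Str.toList_slice, PySem.Chars.slice_eq_listSlice]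
  have h1 : (0 : Int) + 2 * (k : Int) = ((2 * k : Nat) : Int) := by push_cast; ring
  rw [h1]
  have h3 := PySem.List.slice_natCast_add s.toList (2 * k) 2
  push_cast at h3 ⊢
  exact h3

-- ===== VERDICT (by name: the statement is the Claim_ definition above) =====
theorem addSpace_spec : Claim_equal_addSpace := by
  intro s _
  unfold Spec_addSpace
  have h : (addSpace s).toList = (addSpace_alt s).toList := by
    simp [addSpace, addSpaceGo_eq_specGo s 0 1 [], spec_join, alt_toList]
  exact String.toList_inj.mp h
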